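-- pv_equiv track=rewrite | github.com/pypi-data/pypi-mirror-336 | packages/jas-compression/jas_compression-1.0.0-py3-none-any.whl/jas/tokenizer_v1.py | weighted_frequencies
-- ===== SOURCE A (Python) =====
-- def weighted_frequencies(tokens):
--     freq = {}
--     for i, token in enumerate(tokens):
--         boost = 2 if i < 100 else 1
--         if token.istitle():
--             boost += 1
--         if len(token.strip()) > 6:
--             boost += 1
--         freq[token] = freq.get(token, 0) + boost
--     return freq
-- ===== SOURCE B (Python) =====
-- def weighted_frequencies(tokens):
--     tokens = list(tokens)
--     full = {}
--     for t in tokens: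
--         full[t] = full.get(t, 0) + 1
--     head = {}
--     for t in tokens[:100]:
--         head[t] = head.get(t, 0) + 1
--     return {t: c * (1 + t.istitle() + (len(t.strip()) > 6)) + head.get(t, 0)
--             for t, c in full.items()}
-- ===== Notes on version B (the rewrite author's own statement) =====
-- stated objective: alternative
-- what changed: Instead of adding a per-occurrence boost into the dict while enumerating, B counts first (a full count and a count of the first 100 tokens) and then computes each unique token's value once as count*(1 + istitle + long) + head_count, mapping over the unique tokens in first-appearance order.
import Mathlib
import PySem

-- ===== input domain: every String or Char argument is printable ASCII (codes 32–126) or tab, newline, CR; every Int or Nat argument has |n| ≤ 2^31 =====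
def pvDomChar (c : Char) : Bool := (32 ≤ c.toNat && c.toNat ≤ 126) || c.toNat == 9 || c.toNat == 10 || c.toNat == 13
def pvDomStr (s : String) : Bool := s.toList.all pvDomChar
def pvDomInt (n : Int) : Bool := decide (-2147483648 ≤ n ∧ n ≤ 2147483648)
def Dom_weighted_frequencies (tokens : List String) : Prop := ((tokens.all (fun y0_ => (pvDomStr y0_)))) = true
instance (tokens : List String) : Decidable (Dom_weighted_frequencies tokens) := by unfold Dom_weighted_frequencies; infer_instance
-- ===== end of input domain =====

-- B aggregates counts first (one full count and one first-100 count) and applies the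
-- value-dependent weight once per unique token instead of once per occurrence (objective: alternative).

-- hand port of str.istitle (not in PySem); exact on the ASCII domain, where the cased
-- characters are exactly the upper/lower-case letters; state = (prevCased, foundCased, ok)
def pyIstitleStep (st : Bool × Bool × Bool) (c : Char) : Bool × Bool × Bool :=
  if PySem.Chars.isupper c then (true, true, st.2.2 && !st.1)
  else if PySem.Chars.islower c then (true, true, st.2.2 && st.1)
  else (false, st.2.1, st.2.2)

def pyIstitle (s : String) : Bool :=
  let r := s.toList.foldl pyIstitleStep (false, false, true)
  r.2.1 && r.2.2

-- ===== PORT A =====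
def weighted_frequencies (tokens : List String) : List (String × Int) :=
  ((PySem.List.enumerate tokens 0).foldl
    (fun (freq : PySem.Dict String Int) p =>
      let boost0 : Int := if p.1 < 100 then 2 else 1
      let boost1 : Int := if pyIstitle p.2 then boost0 + 1 else boost0
      let boost2 : Int := if 6 < (PySem.Chars.strip p.2.toList).length then boost1 + 1 else boost1
      freq.insert p.2 (freq.getD p.2 0 + boost2))
    PySem.Dict.empty).items

-- ===== PORT B =====
def weighted_frequencies_alt (tokens : List String) : List (String × Int) :=
  let full : PySem.Dict String Int :=
    tokens.foldl (fun d t => d.insert t (d.getD t 0 + 1)) PySem.Dict.empty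
  let head : PySem.Dict String Int :=
    (PySem.List.slice tokens none (some 100)).foldl
      (fun d t => d.insert t (d.getD t 0 + 1)) PySem.Dict.empty
  full.items.map (fun p =>
    (p.1, p.2 * (1 + (if pyIstitle p.1 then (1:Int) else 0)
                   + (if 6 < (PySem.Chars.strip p.1.toList).length then (1:Int) else 0))
          + head.getD p.1 0))

-- ===== PRECONDITION & SPEC =====
def Spec_weighted_frequencies (tokens : List String) (out : List (String × Int)) : Prop := out = weighted_frequencies_alt tokens
instance (tokens : List String) (out : List (String × Int)) : Decidable (Spec_weighted_frequencies tokens out) := by unfold Spec_weighted_frequencies; infer_instance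

-- ===== CLAIM (what is proved, stated in full; the proofs are below) =====
def Claim_equal_weighted_frequencies : Prop := ∀ (tokens : List String), Dom_weighted_frequencies tokens → Spec_weighted_frequencies tokens (weighted_frequencies tokens)

-- ===== LEMMAS AND PROOFS =====

-- the per-occurrence boost A adds, and the per-unique-token weight B multiplies with
def pvBoost (i : Int) (t : String) : Int :=
  (if i < 100 then 2 else 1)
  + (if pyIstitle t then 1 else 0)
  + (if 6 < (PySem.Chars.strip t.toList).length then 1 else 0)

def pvW (t : String) : Int :=
  (if pyIstitle t then 1 else 0)
  + (if 6 < (PySem.Chars.strip t.toList).length then 1 else 0)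

-- A's loop with the boost written as a single expression
def pvAfold (tokens : List String) : PySem.Dict String Int :=
  (PySem.List.enumerate tokens 0).foldl
    (fun (freq : PySem.Dict String Int) p =>
      freq.insert p.2 (freq.getD p.2 0 + pvBoost p.1 p.2))
    PySem.Dict.empty

-- characterisation of A's dict: each token's value is count·(1+w) plus its count among the first 100
lemma pvAfold_getD (tokens : List String) (k : String) :
    (pvAfold tokens).getD k 0
      = (tokens.count k : Int) * (1 + pvW k) + ((tokens.take 100).count k : Int) := by
  induction tokens using List.reverseRecOn with
  | nil => simp [pvAfold]
  | append_singleton ts x ih =>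
    have henum : PySem.List.enumerate (ts ++ [x]) 0
        = PySem.List.enumerate ts 0 ++ [((ts.length : Int), x)] := by
      simp [PySem.List.enumerate_append, PySem.List.enumerate_cons]
    rw [pvAfold, henum, List.foldl_append]
    simp only [List.foldl_cons, List.foldl_nil]
    rw [PySem.Dict.getD_insert]
    rw [show ((PySem.List.enumerate ts 0).foldl
      (fun (freq : PySem.Dict String Int) p =>
        freq.insert p.2 (freq.getD p.2 0 + pvBoost p.1 p.2)) PySem.Dict.empty) = pvAfold ts from rfl]
    by_cases hlt : ts.length < 100
    · have htake : (ts ++ [x]).take 100 = ts ++ [x] := by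
        apply List.take_of_length_le; simp; omega
      have htake' : ts.take 100 = ts := List.take_of_length_le (by omega)
      have hB : pvBoost (ts.length : Int) x = 2 + pvW x := by
        simp only [pvBoost, pvW]
        rw [if_pos (by exact_mod_cast hlt)]
        ring
      rw [htake, hB]
      by_cases hk : k = x
      · subst hk
        rw [if_pos rfl, ih, htake']
        simp [List.count_append]
        ring
      · rw [if_neg hk, ih, htake']
        have hc : List.count k (ts ++ [x]) = List.count k ts := by
          simp [List.count_append, List.count_singleton']; exact fun h => hk h.symm
        rw [hc]
    · have htake : (ts ++ [x]).take 100 = ts.take 100 := by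
        rw [List.take_append]
        have : 100 - ts.length = 0 := by omega
        simp [this]
      have hB : pvBoost (ts.length : Int) x = 1 + pvW x := by
        simp only [pvBoost, pvW]
        rw [if_neg (by exact_mod_cast hlt)]
        ring
      rw [htake, hB]
      by_cases hk : k = x
      · subst hk
        rw [if_pos rfl, ih]
        simp [List.count_append]
        ring
      · rw [if_neg hk, ih]
        have hc : List.count k (ts ++ [x]) = List.count k ts := by
          simp [List.count_append, List.count_singleton']; exact fun h => hk h.symm
        rw [hc]

-- A's port is pvAfold's items (the three += steps summed into pvBoost)
lemma pvA_eq_pvAfold (tokens : List String) : weighted_frequencies tokens = (pvAfold tokens).items := by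
  unfold weighted_frequencies pvAfold
  congr 2
  funext freq p
  simp only [pvBoost]
  congr 1
  split_ifs <;> omega

lemma pvKeysA (tokens : List String) : (pvAfold tokens).keys = PySem.Set.ofList tokens := by
  unfold pvAfold
  rw [PySem.Dict.keys_foldl_insert_key (PySem.List.enumerate tokens 0)
        (key := fun p : Int × String => p.2)
        (f := fun (d : PySem.Dict String Int) p => d.getD p.2 0 + pvBoost p.1 p.2)
        (d := PySem.Dict.empty)]
  rw [PySem.List.map_snd_enumerate, PySem.Set.ofList_eq_foldl]
  rfl

lemma pvNodupA (tokens : List String) : (pvAfold tokens).keys.Nodup := by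
  unfold pvAfold
  exact PySem.Dict.nodup_keys_foldl_insert_key _ _ _ _ (by simp)

-- B's counting loop is Counter-style: getD is the count, keys are the distinct tokens in order
lemma pvCountD (l : List String) (k : String) :
    (l.foldl (fun d t => d.insert t (d.getD t 0 + 1)) (PySem.Dict.empty : PySem.Dict String Int)).getD k 0 = l.count k := by
  rw [PySem.Dict.getD_foldl_insert_add_one]
  simp

lemma pvKeysC (l : List String) :
    (l.foldl (fun d t => d.insert t (d.getD t 0 + 1)) (PySem.Dict.empty : PySem.Dict String Int)).keys = PySem.Set.ofList l := by
  rw [PySem.Dict.keys_foldl_insert, PySem.Set.ofList_eq_foldl]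
  rfl

lemma pvMain (tokens : List String) : weighted_frequencies tokens = weighted_frequencies_alt tokens := by
  rw [pvA_eq_pvAfold]
  simp only [weighted_frequencies_alt]
  have hslice : PySem.List.slice tokens none (some 100) = tokens.take 100 := by
    exact_mod_cast PySem.List.slice_to_natCast tokens 100
  rw [hslice]
  rw [PySem.Dict.items_eq_map_keys _ (pvNodupA tokens) 0, pvKeysA tokens]
  rw [PySem.Dict.items_eq_map_keys _ (by exact PySem.Dict.nodup_keys_foldl_insert _ _ _ (by simp)) 0]
  rw [pvKeysC tokens, List.map_map]
  apply List.map_congr_left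
  intro k _
  simp only [Function.comp]
  rw [pvAfold_getD, pvCountD, pvCountD]
  simp only [pvW]
  ring_nf

-- ===== VERDICT (by name: the statement is the Claim_ definition above) =====
theorem weighted_frequencies_spec : Claim_equal_weighted_frequencies := by
  intro tokens _
  unfold Spec_weighted_frequencies
  exact pvMain tokens
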